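-- pv_equiv track=rewrite | github.com/superdisco-agents/moai-flow | src/moai_flow/coordination/conflict_resolver.py | _vector_dominates
-- ===== SOURCE A (Python) =====
-- from typing import Any, Dict, List, Optional, Set, Union
--
-- def _vector_dominates(
--
--     vc1: Dict[str, int],
--     vc2: Dict[str, int]
-- ) -> bool:
--     """
--     Check if vector clock vc1 causally dominates vc2.
--
--     vc1 dominates vc2 if:
--     - For all agents A: vc1[A] >= vc2[A]
--     - For at least one agent: vc1[A] > vc2[A]
--     """
--     all_agents = set(vc1.keys()) | set(vc2.keys())
--
--     at_least_one_greater = False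
--     for agent in all_agents:
--         v1 = vc1.get(agent, 0)
--         v2 = vc2.get(agent, 0)
--
--         if v1 < v2:
--             return False  # vc1 doesn't dominate
--         if v1 > v2:
--             at_least_one_greater = True
--
--     return at_least_one_greater
-- ===== SOURCE B (Python) =====
-- def _vector_dominates(vc1, vc2):
--     """Check vc1 causally dominates vc2 via a sorted two-pointer merge of the
--     two clocks' items (missing entries count as 0)."""
--     xs = sorted(vc1.items(), key=lambda kv: kv[0])
--     ys = sorted(vc2.items(), key=lambda kv: kv[0])
--
--     def merge(xs, ys, greater):
--         if not xs and not ys: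
--             return greater
--         if not ys or (xs and xs[0][0] < ys[0][0]):
--             v = xs[0][1]  # key only in vc1, compared against implicit 0
--             if v < 0:
--                 return False
--             return merge(xs[1:], ys, greater or v > 0)
--         if not xs or ys[0][0] < xs[0][0]:
--             v = ys[0][1]  # key only in vc2, compared against implicit 0
--             if v > 0:
--                 return False
--             return merge(xs, ys[1:], greater or v < 0)
--         v1, v2 = xs[0][1], ys[0][1]
--         if v1 < v2:
--             return False
--         return merge(xs[1:], ys[1:], greater or v1 > v2)
--
--     return merge(xs, ys, False)
-- ===== Notes on version B (the rewrite author's own statement) =====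
-- stated objective: alternative
-- what changed: B sorts both clocks' items by key and decides dominance with a two-pointer merge of the two sorted lists (unmatched keys compared against 0), instead of A's hash-set union of keys with per-key dict lookups and a flag loop.
import Mathlib
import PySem

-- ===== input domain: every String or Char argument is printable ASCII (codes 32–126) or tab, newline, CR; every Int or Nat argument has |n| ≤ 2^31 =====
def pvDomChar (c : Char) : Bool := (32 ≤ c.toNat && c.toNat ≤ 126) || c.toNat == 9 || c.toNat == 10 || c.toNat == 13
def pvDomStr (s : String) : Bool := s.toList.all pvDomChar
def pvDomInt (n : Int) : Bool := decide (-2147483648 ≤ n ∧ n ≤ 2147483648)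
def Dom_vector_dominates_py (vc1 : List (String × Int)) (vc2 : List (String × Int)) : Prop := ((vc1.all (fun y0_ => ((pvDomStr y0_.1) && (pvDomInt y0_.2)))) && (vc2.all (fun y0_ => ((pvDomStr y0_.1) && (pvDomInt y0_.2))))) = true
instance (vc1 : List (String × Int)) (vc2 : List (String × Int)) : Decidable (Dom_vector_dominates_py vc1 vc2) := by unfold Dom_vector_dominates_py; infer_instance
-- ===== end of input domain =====

-- B replaces A's key-set-union + dict-lookup flag loop by a sort-then-two-pointer
-- merge of the two clocks' sorted item lists (objective: alternative algorithm, same result).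


-- ===== PORT A =====
-- A's loop over the agent set: early return on v1 < v2, flag accumulates 'at_least_one_greater'
def domLoopA (d1 d2 : PySem.Dict String Int) : List String → Bool → Bool
  | [], flag => flag
  | a :: rest, flag =>
    let v1 := d1.getD a 0
    let v2 := d2.getD a 0
    if v1 < v2 then false
    else domLoopA d1 d2 rest (flag || decide (v1 > v2))

def vector_dominates_py (vc1 : List (String × Int)) (vc2 : List (String × Int)) : Bool :=
  let d1 := PySem.Dict.ofList vc1
  let d2 := PySem.Dict.ofList vc2
  let all_agents := PySem.Set.union (PySem.Set.ofList (PySem.Dict.keys d1)) (PySem.Set.ofList (PySem.Dict.keys d2))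
  domLoopA d1 d2 all_agents false

-- ===== PORT B =====
-- B's recursive two-pointer merge over the two key-sorted item lists;
-- a key present on one side only is compared against the implicit value 0
def mergeB : List (String × Int) → List (String × Int) → Bool → Bool
  | [], [], greater => greater
  | (_, v) :: xs, [], greater =>
    if v < 0 then false else mergeB xs [] (greater || decide (v > 0))
  | [], (_, v) :: ys, greater =>
    if v > 0 then false else mergeB [] ys (greater || decide (v < 0))
  | (k1, v1) :: xs, (k2, v2) :: ys, greater =>
    if k1 < k2 then
      if v1 < 0 then false else mergeB xs ((k2, v2) :: ys) (greater || decide (v1 > 0))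
    else if k2 < k1 then
      if v2 > 0 then false else mergeB ((k1, v1) :: xs) ys (greater || decide (v2 < 0))
    else
      if v1 < v2 then false else mergeB xs ys (greater || decide (v1 > v2))

def vector_dominates_py_alt (vc1 : List (String × Int)) (vc2 : List (String × Int)) : Bool :=
  let d1 := PySem.Dict.ofList vc1
  let d2 := PySem.Dict.ofList vc2
  let xs := PySem.List.sorted (PySem.Dict.items d1) (fun kv => kv.1) false
  let ys := PySem.List.sorted (PySem.Dict.items d2) (fun kv => kv.1) false
  mergeB xs ys false

-- ===== PRECONDITION & SPEC =====
def Spec_vector_dominates_py (vc1 : List (String × Int)) (vc2 : List (String × Int)) (out : Bool) : Prop := out = vector_dominates_py_alt vc1 vc2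
instance (vc1 : List (String × Int)) (vc2 : List (String × Int)) (out : Bool) : Decidable (Spec_vector_dominates_py vc1 vc2 out) := by unfold Spec_vector_dominates_py; infer_instance

-- ===== CLAIM (what is proved, stated in full; the proofs are below) =====
def Claim_equal_vector_dominates_py : Prop := ∀ (vc1 : List (String × Int)) (vc2 : List (String × Int)), Dom_vector_dominates_py vc1 vc2 → Spec_vector_dominates_py vc1 vc2 (vector_dominates_py vc1 vc2)

-- ===== LEMMAS AND PROOFS =====

-- assoc-list lookup with default 0 (the semantic value a key has in a clock)
def lk : List (String × Int) → String → Int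
  | [], _ => 0
  | (k, v) :: t, a => if k = a then v else lk t a

theorem lk_of_not_mem (l : List (String × Int)) (a : String) (h : a ∉ l.map Prod.fst) :
    lk l a = 0 := by
  induction l with
  | nil => rfl
  | cons p t ih =>
    obtain ⟨k, v⟩ := p
    simp only [List.map_cons, List.mem_cons] at h
    push Not at h
    simp [lk, Ne.symm h.1, ih h.2]

theorem lk_of_mem (l : List (String × Int)) (a : String) (v : Int)
    (hn : (l.map Prod.fst).Nodup) (hm : (a, v) ∈ l) : lk l a = v := by
  induction l with
  | nil => cases hm
  | cons p t ih =>
    obtain ⟨k, w⟩ := p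
    simp only [List.map_cons, List.nodup_cons] at hn
    rcases List.mem_cons.mp hm with h | h
    · cases h; simp [lk]
    · have hka : k ≠ a := fun he =>
        hn.1 (List.mem_map.mpr ⟨(a, v), h, he.symm⟩)
      simp [lk, hka, ih hn.2 h]

theorem lk_perm_getD (d : PySem.Dict String Int) (l : List (String × Int))
    (hp : l.Perm (PySem.Dict.items d)) (hn : (PySem.Dict.keys d).Nodup) (a : String) :
    lk l a = PySem.Dict.getD d a 0 := by
  have hkeys : (l.map Prod.fst).Perm (PySem.Dict.keys d) := hp.map Prod.fst
  by_cases hmem : a ∈ l.map Prod.fst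
  · obtain ⟨⟨a', v⟩, hin, he⟩ := List.mem_map.mp hmem
    simp only at he
    subst he
    rw [lk_of_mem l a' v (hkeys.nodup_iff.mpr hn) hin]
    exact (PySem.Dict.getD_of_mem_items d (hp.mem_iff.mp hin) hn 0).symm
  · rw [lk_of_not_mem l a hmem]
    have hnk : a ∉ PySem.Dict.keys d := fun h => hmem (hkeys.mem_iff.mpr h)
    have hc : PySem.Dict.contains d a = false := by
      cases hcc : PySem.Dict.contains d a
      · rfl
      · exact absurd ((PySem.Dict.contains_iff_mem_keys d a).mp hcc) hnk
    exact (PySem.Dict.getD_of_not_contains d 0 hc).symm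

-- A's loop equals all/any over the visited key list
theorem domLoopA_eq (d1 d2 : PySem.Dict String Int) (l : List String) (flag : Bool) :
    domLoopA d1 d2 l flag =
      ((l.all (fun a => decide (d1.getD a 0 ≥ d2.getD a 0))) &&
        (flag || l.any (fun a => decide (d1.getD a 0 > d2.getD a 0)))) := by
  induction l generalizing flag with
  | nil => simp [domLoopA]
  | cons a rest ih =>
    simp only [domLoopA, List.all_cons, List.any_cons]
    split_ifs with h
    · simp [h]
    · rw [ih]
      have hge : decide (d1.getD a 0 ≥ d2.getD a 0) = true := by simp; omega
      cases hgt : decide (d1.getD a 0 > d2.getD a 0) <;>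
        cases flag <;> simp [hge]

theorem all_mem_congr {α : Type} (L1 L2 : List α) (p : α → Bool)
    (h : ∀ a, a ∈ L1 ↔ a ∈ L2) : L1.all p = L2.all p := by
  cases h1 : L1.all p <;> cases h2 : L2.all p
  · rfl
  · rw [List.all_eq_false] at h1
    rw [List.all_eq_true] at h2
    obtain ⟨a, ha, hpa⟩ := h1
    exact absurd (h2 a ((h a).mp ha)) (by simp [hpa])
  · rw [List.all_eq_true] at h1
    rw [List.all_eq_false] at h2
    obtain ⟨a, ha, hpa⟩ := h2
    exact absurd (h1 a ((h a).mpr ha)) (by simp [hpa])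
  · rfl

theorem any_mem_congr {α : Type} (L1 L2 : List α) (p : α → Bool)
    (h : ∀ a, a ∈ L1 ↔ a ∈ L2) : L1.any p = L2.any p := by
  cases h1 : L1.any p <;> cases h2 : L2.any p
  · rfl
  · rw [List.any_eq_false] at h1
    rw [List.any_eq_true] at h2
    obtain ⟨a, ha, hpa⟩ := h2
    exact absurd hpa (by simp [h1 a ((h a).mpr ha)])
  · rw [List.any_eq_true] at h1
    rw [List.any_eq_false] at h2
    obtain ⟨a, ha, hpa⟩ := h1
    exact absurd hpa (by simp [h2 a ((h a).mp ha)])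
  · rfl

theorem all_pointwise_congr {α : Type} (l : List α) (p q : α → Bool)
    (h : ∀ a ∈ l, p a = q a) : l.all p = l.all q := by
  induction l with
  | nil => rfl
  | cons x t ih => simp_all [List.all_cons]

theorem any_pointwise_congr {α : Type} (l : List α) (p q : α → Bool)
    (h : ∀ a ∈ l, p a = q a) : l.any p = l.any q := by
  induction l with
  | nil => rfl
  | cons x t ih => simp_all [List.any_cons]

theorem lk_cons_ne (k : String) (v : Int) (t : List (String × Int)) (a : String)
    (h : k ≠ a) : lk ((k, v) :: t) a = lk t a := by simp [lk, h]

theorem lk_cons_self (k : String) (v : Int) (t : List (String × Int)) :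
    lk ((k, v) :: t) k = v := by simp [lk]

-- B's merge equals all/any over the concatenated key lists, for key-strictly-sorted inputs
theorem mergeB_eq (xs ys : List (String × Int)) (flag : Bool)
    (hx : xs.Pairwise (fun p q => p.1 < q.1)) (hy : ys.Pairwise (fun p q => p.1 < q.1)) :
    mergeB xs ys flag =
      (((xs.map Prod.fst ++ ys.map Prod.fst).all (fun a => decide (lk xs a ≥ lk ys a))) &&
        (flag || (xs.map Prod.fst ++ ys.map Prod.fst).any (fun a => decide (lk xs a > lk ys a)))) := by
  revert hx hy
  induction xs, ys, flag using mergeB.induct with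
  | case1 flag => intro _ _; simp [mergeB]
  | case2 k v t flag hv =>
    intro hx hy
    have : decide (lk ((k, v) :: t) k ≥ lk ([] : List (String × Int)) k) = false := by
      rw [lk_cons_self]; simp [lk]; omega
    simp [mergeB, hv, this]
  | case3 k v t flag hv ih =>
    intro hx hy
    rw [List.pairwise_cons] at hx
    simp only [mergeB, if_neg hv]
    rw [ih hx.2 hy]
    have hpk : decide (lk ((k, v) :: t) k ≥ lk ([] : List (String × Int)) k) = true := by
      rw [lk_cons_self]; simp [lk]; omega
    have hca : ∀ a ∈ t.map Prod.fst ++ ([] : List (String × Int)).map Prod.fst,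
        (fun a => decide (lk t a ≥ lk ([] : List (String × Int)) a)) a
          = (fun a => decide (lk ((k, v) :: t) a ≥ lk ([] : List (String × Int)) a)) a := by
      intro a ha
      simp only [List.map_nil, List.append_nil, List.mem_map] at ha
      obtain ⟨p, hp, he⟩ := ha
      have : k ≠ a := he ▸ (hx.1 p hp).ne
      simp [lk_cons_ne k v t a this]
    have hcb : ∀ a ∈ t.map Prod.fst ++ ([] : List (String × Int)).map Prod.fst,
        (fun a => decide (lk t a > lk ([] : List (String × Int)) a)) a
          = (fun a => decide (lk ((k, v) :: t) a > lk ([] : List (String × Int)) a)) a := by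
      intro a ha
      simp only [List.map_nil, List.append_nil, List.mem_map] at ha
      obtain ⟨p, hp, he⟩ := ha
      have : k ≠ a := he ▸ (hx.1 p hp).ne
      simp [lk_cons_ne k v t a this]
    rw [all_pointwise_congr _ _ _ hca, any_pointwise_congr _ _ _ hcb]
    simp only [List.map_cons, List.cons_append, List.all_cons, List.any_cons, hpk,
      Bool.true_and]
    have hvgt : decide (v > 0) = decide (lk ((k, v) :: t) k > lk ([] : List (String × Int)) k) := by
      rw [lk_cons_self]; simp [lk]
    rw [hvgt]
    cases hgt : decide (lk ((k, v) :: t) k > lk ([] : List (String × Int)) k) <;>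
      cases flag <;> simp 
  | case4 k v t flag hv =>
    intro hx hy
    have : decide (lk ([] : List (String × Int)) k ≥ lk ((k, v) :: t) k) = false := by
      rw [lk_cons_self]; simp [lk]; omega
    simp [mergeB, hv, this]
  | case5 k v t flag hv ih =>
    intro hx hy
    rw [List.pairwise_cons] at hy
    simp only [mergeB, if_neg hv]
    rw [ih hx hy.2]
    have hpk : decide (lk ([] : List (String × Int)) k ≥ lk ((k, v) :: t) k) = true := by
      rw [lk_cons_self]; simp [lk]; omega
    have hca : ∀ a ∈ ([] : List (String × Int)).map Prod.fst ++ t.map Prod.fst,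
        (fun a => decide (lk ([] : List (String × Int)) a ≥ lk t a)) a
          = (fun a => decide (lk ([] : List (String × Int)) a ≥ lk ((k, v) :: t) a)) a := by
      intro a ha
      simp only [List.map_nil, List.nil_append, List.mem_map] at ha
      obtain ⟨p, hp, he⟩ := ha
      have : k ≠ a := he ▸ (hy.1 p hp).ne
      simp [lk_cons_ne k v t a this]
    have hcb : ∀ a ∈ ([] : List (String × Int)).map Prod.fst ++ t.map Prod.fst,
        (fun a => decide (lk ([] : List (String × Int)) a > lk t a)) a
          = (fun a => decide (lk ([] : List (String × Int)) a > lk ((k, v) :: t) a)) a := by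
      intro a ha
      simp only [List.map_nil, List.nil_append, List.mem_map] at ha
      obtain ⟨p, hp, he⟩ := ha
      have : k ≠ a := he ▸ (hy.1 p hp).ne
      simp [lk_cons_ne k v t a this]
    rw [all_pointwise_congr _ _ _ hca, any_pointwise_congr _ _ _ hcb]
    simp only [List.map_cons]
    have hvgt : decide (v < 0) = decide (lk ([] : List (String × Int)) k > lk ((k, v) :: t) k) := by
      rw [lk_cons_self]
      exact (decide_eq_decide).mpr (by simp [lk])
    rw [hvgt]
    cases hgt : decide (lk ([] : List (String × Int)) k > lk ((k, v) :: t) k) <;>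
      cases flag <;> simp [hgt, hpk]
  | case6 k1 v1 t1 k2 v2 t2 flag hk hv =>
    intro hx hy
    have hk21 : k2 ≠ k1 := (ne_of_gt hk)
    have : decide (lk ((k1, v1) :: t1) k1 ≥ lk ((k2, v2) :: t2) k1) = false := by
      rw [lk_cons_self, lk_cons_ne _ _ _ _ hk21]
      have : lk t2 k1 = 0 := by
        apply lk_of_not_mem
        intro hm
        obtain ⟨p, hp, he⟩ := List.mem_map.mp hm
        have := (List.pairwise_cons.mp hy).1 p hp
        rw [he] at this
        exact absurd (lt_trans hk this) (lt_irrefl k1)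
      rw [this]; simp; omega
    simp [mergeB, hk, hv, this]
  | case7 k1 v1 t1 k2 v2 t2 flag hk hv ih =>
    intro hx hy
    rw [List.pairwise_cons] at hx
    simp only [mergeB, if_pos hk, if_neg hv]
    rw [ih hx.2 hy]
    have h2k1 : lk ((k2, v2) :: t2) k1 = 0 := by
      rw [lk_cons_ne _ _ _ _ (ne_of_gt hk)]
      apply lk_of_not_mem
      intro hm
      obtain ⟨p, hp, he⟩ := List.mem_map.mp hm
      have := (List.pairwise_cons.mp hy).1 p hp
      rw [he] at this
      exact absurd (lt_trans hk this) (lt_irrefl k1)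
    have hpk : decide (lk ((k1, v1) :: t1) k1 ≥ lk ((k2, v2) :: t2) k1) = true := by
      rw [lk_cons_self, h2k1]; simp; omega
    have hmemlt : ∀ a ∈ t1.map Prod.fst ++ ((k2, v2) :: t2).map Prod.fst, k1 ≠ a := by
      intro a ha
      rcases List.mem_append.mp ha with h | h
      · obtain ⟨p, hp, he⟩ := List.mem_map.mp h
        exact he ▸ (hx.1 p hp).ne
      · simp only [List.map_cons, List.mem_cons] at h
        rcases h with h | h
        · exact h ▸ hk.ne
        · obtain ⟨p, hp, he⟩ := List.mem_map.mp h
          have := (List.pairwise_cons.mp hy).1 p hp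
          exact he ▸ (lt_trans hk this).ne
    have hca : ∀ a ∈ t1.map Prod.fst ++ ((k2, v2) :: t2).map Prod.fst,
        (fun a => decide (lk t1 a ≥ lk ((k2, v2) :: t2) a)) a
          = (fun a => decide (lk ((k1, v1) :: t1) a ≥ lk ((k2, v2) :: t2) a)) a := by
      intro a ha; simp [lk_cons_ne k1 v1 t1 a (hmemlt a ha)]
    have hcb : ∀ a ∈ t1.map Prod.fst ++ ((k2, v2) :: t2).map Prod.fst,
        (fun a => decide (lk t1 a > lk ((k2, v2) :: t2) a)) a
          = (fun a => decide (lk ((k1, v1) :: t1) a > lk ((k2, v2) :: t2) a)) a := by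
      intro a ha; simp [lk_cons_ne k1 v1 t1 a (hmemlt a ha)]
    rw [all_pointwise_congr _ _ _ hca, any_pointwise_congr _ _ _ hcb]
    simp only [List.map_cons, List.cons_append, List.all_cons, List.any_cons, hpk,
      Bool.true_and]
    have hvgt : decide (v1 > 0) = decide (lk ((k1, v1) :: t1) k1 > lk ((k2, v2) :: t2) k1) := by
      rw [lk_cons_self, h2k1]
    rw [hvgt]
    cases hgt : decide (lk ((k1, v1) :: t1) k1 > lk ((k2, v2) :: t2) k1) <;>
      cases flag <;> simp 
  | case8 k1 v1 t1 k2 v2 t2 flag hk12 hk hv =>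
    intro hx hy
    have : decide (lk ((k1, v1) :: t1) k2 ≥ lk ((k2, v2) :: t2) k2) = false := by
      rw [lk_cons_self, lk_cons_ne _ _ _ _ (ne_of_gt hk)]
      have : lk t1 k2 = 0 := by
        apply lk_of_not_mem
        intro hm
        obtain ⟨p, hp, he⟩ := List.mem_map.mp hm
        have := (List.pairwise_cons.mp hx).1 p hp
        rw [he] at this
        exact absurd (lt_trans hk this) (lt_irrefl k2)
      rw [this]; simp; omega
    have hmem : k2 ∈ t1.map Prod.fst ++ ((k2, v2) :: t2).map Prod.fst := by
      simp
    have hall : (((k1, v1) :: t1).map Prod.fst ++ ((k2, v2) :: t2).map Prod.fst).all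
        (fun a => decide (lk ((k1, v1) :: t1) a ≥ lk ((k2, v2) :: t2) a)) = false := by
      apply List.all_eq_false.mpr
      exact ⟨k2, by simp, by simp [this]⟩
    rw [show mergeB ((k1, v1) :: t1) ((k2, v2) :: t2) flag = false by
      simp [mergeB, hk12, hk, hv]]
    rw [hall]
    simp
  | case9 k1 v1 t1 k2 v2 t2 flag hk12 hk hv ih =>
    intro hx hy
    rw [List.pairwise_cons] at hy
    simp only [mergeB, if_neg hk12, if_pos hk, if_neg hv]
    rw [ih hx hy.2]
    have h1k2 : lk ((k1, v1) :: t1) k2 = 0 := by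
      rw [lk_cons_ne _ _ _ _ (ne_of_gt hk)]
      apply lk_of_not_mem
      intro hm
      obtain ⟨p, hp, he⟩ := List.mem_map.mp hm
      have := (List.pairwise_cons.mp hx).1 p hp
      rw [he] at this
      exact absurd (lt_trans hk this) (lt_irrefl k2)
    have hpk : decide (lk ((k1, v1) :: t1) k2 ≥ lk ((k2, v2) :: t2) k2) = true := by
      rw [lk_cons_self, h1k2]; simp; omega
    have hmemlt : ∀ a ∈ ((k1, v1) :: t1).map Prod.fst ++ t2.map Prod.fst, k2 ≠ a := by
      intro a ha
      rcases List.mem_append.mp ha with h | h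
      · simp only [List.map_cons, List.mem_cons] at h
        rcases h with h | h
        · exact h ▸ hk.ne
        · obtain ⟨p, hp, he⟩ := List.mem_map.mp h
          have := (List.pairwise_cons.mp hx).1 p hp
          exact he ▸ (lt_trans hk this).ne
      · obtain ⟨p, hp, he⟩ := List.mem_map.mp h
        exact he ▸ (hy.1 p hp).ne
    have hca : ∀ a ∈ ((k1, v1) :: t1).map Prod.fst ++ t2.map Prod.fst,
        (fun a => decide (lk ((k1, v1) :: t1) a ≥ lk t2 a)) a
          = (fun a => decide (lk ((k1, v1) :: t1) a ≥ lk ((k2, v2) :: t2) a)) a := by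
      intro a ha; simp [lk_cons_ne k2 v2 t2 a (hmemlt a ha)]
    have hcb : ∀ a ∈ ((k1, v1) :: t1).map Prod.fst ++ t2.map Prod.fst,
        (fun a => decide (lk ((k1, v1) :: t1) a > lk t2 a)) a
          = (fun a => decide (lk ((k1, v1) :: t1) a > lk ((k2, v2) :: t2) a)) a := by
      intro a ha; simp [lk_cons_ne k2 v2 t2 a (hmemlt a ha)]
    rw [all_pointwise_congr _ _ _ hca, any_pointwise_congr _ _ _ hcb]
    -- move the k2 element to the front of the append on the RHS
    have hsplit_all : ∀ p : String → Bool,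
        (((k1, v1) :: t1).map Prod.fst ++ ((k2, v2) :: t2).map Prod.fst).all p
          = (p k2 && (((k1, v1) :: t1).map Prod.fst ++ t2.map Prod.fst).all p) := by
      intro p
      simp only [List.map_cons, List.all_append, List.all_cons]
      cases p k2 <;> cases p k1 <;> simp [Bool.and_comm]
    have hsplit_any : ∀ p : String → Bool,
        (((k1, v1) :: t1).map Prod.fst ++ ((k2, v2) :: t2).map Prod.fst).any p
          = (p k2 || (((k1, v1) :: t1).map Prod.fst ++ t2.map Prod.fst).any p) := by
      intro p
      simp only [List.map_cons, List.any_append, List.any_cons]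
      cases p k2 <;> cases p k1 <;> simp [Bool.or_comm]
    rw [hsplit_all, hsplit_any, hpk]
    simp only [Bool.true_and]
    have hvgt : decide (v2 < 0) = decide (lk ((k1, v1) :: t1) k2 > lk ((k2, v2) :: t2) k2) := by
      rw [lk_cons_self, h1k2]
    rw [hvgt]
    cases hgt : decide (lk ((k1, v1) :: t1) k2 > lk ((k2, v2) :: t2) k2) <;>
      cases flag <;> simp 
  | case10 k1 v1 t1 k2 v2 t2 flag hk12 hk21 hv =>
    intro hx hy
    have hkeq : k1 = k2 := le_antisymm (not_lt.mp hk21) (not_lt.mp hk12)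
    subst hkeq
    have : decide (lk ((k1, v1) :: t1) k1 ≥ lk ((k1, v2) :: t2) k1) = false := by
      rw [lk_cons_self, lk_cons_self]; simp; omega
    simp [mergeB, hv, this]
  | case11 k1 v1 t1 k2 v2 t2 flag hk12 hk21 hv ih =>
    intro hx hy
    have hkeq : k1 = k2 := le_antisymm (not_lt.mp hk21) (not_lt.mp hk12)
    subst hkeq
    rw [List.pairwise_cons] at hx hy
    simp only [mergeB, if_neg hk12, if_neg hv]
    rw [ih hx.2 hy.2]
    have hpk : decide (lk ((k1, v1) :: t1) k1 ≥ lk ((k1, v2) :: t2) k1) = true := by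
      rw [lk_cons_self, lk_cons_self]; simp; omega
    have hmemlt : ∀ a ∈ t1.map Prod.fst ++ t2.map Prod.fst, k1 ≠ a := by
      intro a ha
      rcases List.mem_append.mp ha with h | h
      · obtain ⟨p, hp, he⟩ := List.mem_map.mp h
        exact he ▸ (hx.1 p hp).ne
      · obtain ⟨p, hp, he⟩ := List.mem_map.mp h
        exact he ▸ (hy.1 p hp).ne
    have hca : ∀ a ∈ t1.map Prod.fst ++ t2.map Prod.fst,
        (fun a => decide (lk t1 a ≥ lk t2 a)) a
          = (fun a => decide (lk ((k1, v1) :: t1) a ≥ lk ((k1, v2) :: t2) a)) a := by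
      intro a ha
      simp [lk_cons_ne k1 v1 t1 a (hmemlt a ha), lk_cons_ne k1 v2 t2 a (hmemlt a ha)]
    have hcb : ∀ a ∈ t1.map Prod.fst ++ t2.map Prod.fst,
        (fun a => decide (lk t1 a > lk t2 a)) a
          = (fun a => decide (lk ((k1, v1) :: t1) a > lk ((k1, v2) :: t2) a)) a := by
      intro a ha
      simp [lk_cons_ne k1 v1 t1 a (hmemlt a ha), lk_cons_ne k1 v2 t2 a (hmemlt a ha)]
    rw [all_pointwise_congr _ _ _ hca, any_pointwise_congr _ _ _ hcb]
    have hsplit_all : ∀ p : String → Bool,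
        (((k1, v1) :: t1).map Prod.fst ++ ((k1, v2) :: t2).map Prod.fst).all p
          = (p k1 && (t1.map Prod.fst ++ t2.map Prod.fst).all p) := by
      intro p
      simp only [List.map_cons, List.all_append, List.all_cons]
      cases p k1 <;> simp 
    have hsplit_any : ∀ p : String → Bool,
        (((k1, v1) :: t1).map Prod.fst ++ ((k1, v2) :: t2).map Prod.fst).any p
          = (p k1 || (t1.map Prod.fst ++ t2.map Prod.fst).any p) := by
      intro p
      simp only [List.map_cons, List.any_append, List.any_cons]
      cases p k1 <;> simp 
    rw [hsplit_all, hsplit_any, hpk]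
    simp only [Bool.true_and]
    have hvgt : decide (v1 > v2) = decide (lk ((k1, v1) :: t1) k1 > lk ((k1, v2) :: t2) k1) := by
      rw [lk_cons_self, lk_cons_self]
    rw [hvgt]
    cases hgt : decide (lk ((k1, v1) :: t1) k1 > lk ((k1, v2) :: t2) k1) <;>
      cases flag <;> simp 

theorem sorted_items_facts (vc : List (String × Int)) :
    (PySem.List.sorted (PySem.Dict.items (PySem.Dict.ofList vc)) (fun kv => kv.1) false).Pairwise
        (fun p q => p.1 < q.1) ∧
      (PySem.List.sorted (PySem.Dict.items (PySem.Dict.ofList vc)) (fun kv => kv.1) false).Perm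
        (PySem.Dict.items (PySem.Dict.ofList vc)) := by
  set d := PySem.Dict.ofList vc with hd
  set l := PySem.List.sorted (PySem.Dict.items d) (fun kv => kv.1) false with hl
  have hperm : l.Perm (PySem.Dict.items d) := PySem.List.sorted_perm _ _ _
  have hkn : (PySem.Dict.keys d).Nodup := PySem.Dict.nodup_keys_ofList vc
  have hkeys : PySem.Dict.keys d = (PySem.Dict.items d).map Prod.fst := by
    simp only [PySem.Dict.keys]
  have hnodup : (l.map Prod.fst).Nodup := by
    refine (hperm.map Prod.fst).nodup_iff.mpr ?_
    rw [← hkeys]; exact hkn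
  have hne : l.Pairwise (fun p q => p.1 ≠ q.1) := List.pairwise_map.mp hnodup
  have hle : l.Pairwise (fun p q => p.1 ≤ q.1) := PySem.List.sorted_pairwise _ _
  refine ⟨?_, hperm⟩
  exact (hle.and hne).imp (fun h => lt_of_le_of_ne h.1 h.2)

-- ===== VERDICT (by name: the statement is the Claim_ definition above) =====
theorem vector_dominates_py_spec : Claim_equal_vector_dominates_py := by
  intro vc1 vc2 _
  unfold Spec_vector_dominates_py vector_dominates_py vector_dominates_py_alt
  simp only []
  obtain ⟨hx, hpx⟩ := sorted_items_facts vc1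
  obtain ⟨hy, hpy⟩ := sorted_items_facts vc2
  rw [domLoopA_eq, mergeB_eq _ _ false hx hy]
  have f1 : ∀ a, lk (PySem.List.sorted (PySem.Dict.items (PySem.Dict.ofList vc1)) (fun kv => kv.1) false) a
      = PySem.Dict.getD (PySem.Dict.ofList vc1) a 0 :=
    lk_perm_getD _ _ hpx (PySem.Dict.nodup_keys_ofList vc1)
  have f2 : ∀ a, lk (PySem.List.sorted (PySem.Dict.items (PySem.Dict.ofList vc2)) (fun kv => kv.1) false) a
      = PySem.Dict.getD (PySem.Dict.ofList vc2) a 0 :=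
    lk_perm_getD _ _ hpy (PySem.Dict.nodup_keys_ofList vc2)
  simp only [f1, f2]
  have hkeys1 : PySem.Dict.keys (PySem.Dict.ofList vc1)
      = (PySem.Dict.items (PySem.Dict.ofList vc1)).map Prod.fst := by
    simp only [PySem.Dict.keys]
  have hkeys2 : PySem.Dict.keys (PySem.Dict.ofList vc2)
      = (PySem.Dict.items (PySem.Dict.ofList vc2)).map Prod.fst := by
    simp only [PySem.Dict.keys]
  have hmem : ∀ a,
      a ∈ PySem.Set.union (PySem.Set.ofList (PySem.Dict.keys (PySem.Dict.ofList vc1)))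
            (PySem.Set.ofList (PySem.Dict.keys (PySem.Dict.ofList vc2)))
        ↔ a ∈ (PySem.List.sorted (PySem.Dict.items (PySem.Dict.ofList vc1)) (fun kv => kv.1) false).map Prod.fst
            ++ (PySem.List.sorted (PySem.Dict.items (PySem.Dict.ofList vc2)) (fun kv => kv.1) false).map Prod.fst := by
    intro a
    rw [PySem.Set.mem_union, List.mem_append]
    rw [PySem.Set.mem_ofList, PySem.Set.mem_ofList]
    rw [(hpx.map Prod.fst).mem_iff, (hpy.map Prod.fst).mem_iff, hkeys1, hkeys2]
  rw [all_mem_congr _ _ _ hmem, any_mem_congr _ _ _ hmem]
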